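-- pv_equiv track=rewrite | github.com/ryanshappell/Advent-of-Code-2019 | day4/day4_p2.py | check
-- ===== SOURCE A (Python) =====
-- def check(val):
--     doubles = []
--     checked = []
--     for i in range(len(val)-1):
--         if val[i] > val[i+1]:
--             return False
--         if val[i] == val[i+1]:
--             if val[i] in doubles:
--                 doubles.remove(val[i])
--             elif val[i] not in checked:
--                 checked.append(val[i])
--                 doubles.append(val[i])
--     return len(doubles) > 0
-- ===== SOURCE B (Python) =====
-- def check(val):
--     # One pass tracking the current run length instead of doubles/checked lists:
--     # non-decreasing and some maximal run of equal values has length exactly 2.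
--     if not val:
--         return False
--     run = 1
--     has_two = False
--     for a, b in zip(val, val[1:]):
--         if a > b:
--             return False
--         if a == b:
--             run += 1
--         else:
--             if run == 2:
--                 has_two = True
--             run = 1
--     return has_two or run == 2
-- ===== Notes on version B (the rewrite author's own statement) =====
-- stated objective: simpler
-- what changed: Replaces the doubles/checked membership lists (with add/remove bookkeeping) by a single pass that tracks the current run length and a boolean 'some run had length exactly 2'.
import Mathlib
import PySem

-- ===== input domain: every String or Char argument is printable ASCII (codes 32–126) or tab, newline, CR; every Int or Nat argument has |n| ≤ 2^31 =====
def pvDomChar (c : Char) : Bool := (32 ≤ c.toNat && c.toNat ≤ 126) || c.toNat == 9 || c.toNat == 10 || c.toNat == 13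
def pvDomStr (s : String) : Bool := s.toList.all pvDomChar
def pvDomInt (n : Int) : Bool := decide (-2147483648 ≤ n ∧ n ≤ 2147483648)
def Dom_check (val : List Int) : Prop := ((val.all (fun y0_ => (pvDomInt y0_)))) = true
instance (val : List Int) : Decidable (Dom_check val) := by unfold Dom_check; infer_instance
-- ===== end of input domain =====

-- B is a one-pass run-length scan; A keeps doubles/checked lists. Return values proved equal on all inputs.

-- ===== PORT A =====
-- A's loop over i in range(len(val)-1) reads (val[i], val[i+1]); ported as recursion
-- over the adjacent-pairs list val.zip val.tail, carrying the doubles/checked lists.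
def checkGoA : List (Int × Int) → List Int → List Int → Bool
  | [], doubles, _ => decide (0 < doubles.length)
  | (a, b) :: rest, doubles, checked =>
    if a > b then false
    else if a = b then
      if a ∈ doubles then checkGoA rest (doubles.erase a) checked
      else if a ∉ checked then checkGoA rest (doubles ++ [a]) (checked ++ [a])
      else checkGoA rest doubles checked
    else checkGoA rest doubles checked

def check (val : List Int) : Bool := checkGoA (val.zip val.tail) [] []

-- ===== PORT B =====
def checkGoB : List (Int × Int) → Int → Bool → Bool
  | [], run, hasTwo => hasTwo || decide (run = 2)
  | (a, b) :: rest, run, hasTwo =>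
    if a > b then false
    else if a = b then checkGoB rest (run + 1) hasTwo
    else checkGoB rest 1 (hasTwo || decide (run = 2))

def check_alt (val : List Int) : Bool :=
  if val.isEmpty then false else checkGoB (val.zip val.tail) 1 false

-- ===== PRECONDITION & SPEC =====
def Spec_check (val : List Int) (out : Bool) : Prop := out = check_alt val
instance (val : List Int) (out : Bool) : Decidable (Spec_check val out) := by unfold Spec_check; infer_instance

-- ===== CLAIM (what is proved, stated in full; the proofs are below) =====
def Claim_equal_check : Prop := ∀ (val : List Int), Dom_check val → Spec_check val (check val)

-- ===== LEMMAS AND PROOFS =====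

-- Invariant relating A's (doubles, checked) state to B's (run, hasTwo) state while
-- scanning the adjacent pairs of c :: xs, where c is the last element already seen
-- and run is the length of the current maximal run of equal values ending at c.
theorem checkGo_eq (xs : List Int) : ∀ (c r : Int) (doubles checked : List Int) (hasTwo : Bool),
    1 ≤ r →
    (∀ x ∈ doubles, x ≤ c) →
    (∀ x ∈ checked, x ≤ c) →
    (c ∈ doubles ↔ r = 2) →
    (c ∈ checked ↔ 2 ≤ r) →
    ((∃ x ∈ doubles, x ≠ c) ↔ hasTwo = true) →
    doubles.count c ≤ 1 →
    checkGoA ((c :: xs).zip xs) doubles checked = checkGoB ((c :: xs).zip xs) r hasTwo := by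
  induction xs with
  | nil =>
    intro c r doubles checked hasTwo h1 hd hc h3 h4 h5 h6
    simp only [List.zip_nil_right, checkGoA, checkGoB]
    by_cases hne : ∃ x ∈ doubles, x ≠ c
    · have := h5.1 hne
      obtain ⟨x, hx, _⟩ := hne
      simp [this, List.length_pos_iff.2 (List.ne_nil_of_mem hx)]
    · have hTf : hasTwo = false := by
        cases hasTwo with
        | false => rfl
        | true => exact absurd (h5.2 rfl) hne
      subst hTf
      by_cases hr : r = 2
      · have : c ∈ doubles := h3.2 hr
        simp [hr, List.length_pos_iff.2 (List.ne_nil_of_mem this)]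
      · have hcd : c ∉ doubles := fun h => hr (h3.1 h)
        have : doubles = [] := by
          cases doubles with
          | nil => rfl
          | cons y ys =>
            exfalso
            by_cases hyc : y = c
            · exact hcd (hyc ▸ List.mem_cons_self)
            · exact hne ⟨y, List.mem_cons_self, hyc⟩
        simp [this, hr]
  | cons b xs ih =>
    intro c r doubles checked hasTwo h1 hd hc h3 h4 h5 h6
    simp only [List.zip_cons_cons, checkGoA, checkGoB]
    by_cases hgt : c > b
    · simp [hgt]
    · simp only [if_neg hgt]
      by_cases heq : c = b
      · subst heq
        rw [if_pos rfl, if_pos rfl]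
        by_cases hin : c ∈ doubles
        · have hr2 : r = 2 := h3.1 hin
          rw [if_pos hin]
          apply ih c (r + 1) _ _ _ (by omega)
          · intro x hx; exact hd x (List.mem_of_mem_erase hx)
          · exact hc
          · constructor
            · intro h
              exfalso
              have := List.count_pos_iff.2 h
              rw [List.count_erase_self] at this
              omega
            · omega
          · rw [h4]; omega
          · rw [← h5]
            constructor
            · rintro ⟨x, hx, hxc⟩
              exact ⟨x, List.mem_of_mem_erase hx, hxc⟩
            · rintro ⟨x, hx, hxc⟩
              exact ⟨x, (List.mem_erase_of_ne hxc).2 hx, hxc⟩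
          · rw [List.count_erase_self]; omega
        · rw [if_neg hin]
          by_cases hck : c ∈ checked
          · have hr3 : 3 ≤ r := by
              have := h4.1 hck
              rcases lt_or_ge r 3 with h | h
              · exfalso; exact hin (h3.2 (by omega))
              · exact h
            rw [if_neg (by simpa using hck)]
            apply ih c (r + 1) _ _ _ (by omega)
            · exact hd
            · exact hc
            · rw [h3]; constructor
              · intro h; omega
              · intro h; omega
            · rw [h4]; omega
            · exact h5
            · exact h6
          · have hr1 : r = 1 := by
              have : ¬ 2 ≤ r := fun h => hck (h4.2 h)
              omega
            rw [if_pos (by simpa using hck)]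
            apply ih c (r + 1) _ _ _ (by omega)
            · intro x hx
              rcases List.mem_append.1 hx with h | h
              · exact hd x h
              · simp at h; omega
            · intro x hx
              rcases List.mem_append.1 hx with h | h
              · exact hc x h
              · simp at h; omega
            · simp; omega
            · constructor
              · intro _; omega
              · intro _; exact List.mem_append.2 (Or.inr (by simp))
            · rw [← h5]
              constructor
              · rintro ⟨x, hx, hxc⟩
                rcases List.mem_append.1 hx with h | h
                · exact ⟨x, h, hxc⟩
                · simp at h; exact absurd h hxc
              · rintro ⟨x, hx, hxc⟩
                exact ⟨x, List.mem_append.2 (Or.inl hx), hxc⟩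
            · rw [List.count_append]
              have : doubles.count c = 0 := List.count_eq_zero.2 hin
              simp [this]
      · have hlt : c < b := lt_of_le_of_ne (not_lt.1 hgt) heq
        simp only [if_neg heq]
        apply ih b 1 _ _ _ (by omega)
        · intro x hx; exact le_of_lt (lt_of_le_of_lt (hd x hx) hlt)
        · intro x hx; exact le_of_lt (lt_of_le_of_lt (hc x hx) hlt)
        · constructor
          · intro h; exact absurd rfl (ne_of_lt (lt_of_le_of_lt (hd b h) hlt))
          · intro h; omega
        · constructor
          · intro h; exact absurd rfl (ne_of_lt (lt_of_le_of_lt (hc b h) hlt))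
          · intro h; omega
        · constructor
          · rintro ⟨x, hx, _⟩
            by_cases hxc : x = c
            · subst hxc
              have := h3.1 hx
              simp [this]
            · have := h5.1 ⟨x, hx, hxc⟩
              simp [this]
          · intro h
            rcases Bool.or_eq_true_iff.1 h with h | h
            · obtain ⟨x, hx, hxc⟩ := h5.2 h
              exact ⟨x, hx, ne_of_lt (lt_of_le_of_lt (hd x hx) hlt)⟩
            · have hr2 : r = 2 := of_decide_eq_true h
              have hcm : c ∈ doubles := h3.2 hr2
              exact ⟨c, hcm, ne_of_lt hlt⟩
        · have : List.count b doubles = 0 := List.count_eq_zero.2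
            (fun h => absurd rfl (ne_of_lt (lt_of_le_of_lt (hd b h) hlt)))
          omega

-- ===== VERDICT (by name: the statement is the Claim_ definition above) =====
theorem check_spec : Claim_equal_check := by
  intro val _
  unfold Spec_check check check_alt
  cases val with
  | nil => simp [checkGoA]
  | cons c xs =>
    rw [if_neg (by simp)]
    refine checkGo_eq xs c 1 [] [] false (by omega) (by simp) (by simp) ?_ ?_ ?_ ?_
    · constructor
      · intro h; cases h
      · intro h; omega
    · constructor
      · intro h; cases h
      · intro h; omega
    · constructor
      · rintro ⟨x, hx, -⟩; cases hx
      · intro h; cases h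
    · simp
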